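-- pv_equiv track=rewrite | github.com/mix130913865-W/Py-00 | password_inspector.py | pw_inspector
-- ===== SOURCE A (Python) =====
-- def pw_inspector(password):
--     issuses = []
--     if not password:
--         issuses.append("Please enter a password")
--     if len(password) < 8:
--         issuses.append("at least 8 characters")
--     if not any(char.isdigit() for char in password):
--         issuses.append("contain at least one digit")
--     if not any(char.isupper() for char in password):
--         issuses.append("contain at least one uppercase letter")
--     if not any(char.islower() for char in password):
--         issuses.append("contain at least one lowercase letter")
--     if not any(char in "!@#$%^&*()-_=+[]{}|;:',.<>?/" for char in password):
--         issuses.append("contain at least one special character")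
--     if issuses:
--         return ", ".join(issuses)
--     return "great password"
-- ===== SOURCE B (Python) =====
-- def pw_inspector(password):
--     has_digit = has_upper = has_lower = has_special = False
--     for ch in password:
--         if ch.isdigit():
--             has_digit = True
--         if ch.isupper():
--             has_upper = True
--         if ch.islower():
--             has_lower = True
--         if ch in "!@#$%^&*()-_=+[]{}|;:',.<>?/":
--             has_special = True
--     issues = []
--     if not password:
--         issues.append("Please enter a password")
--     if len(password) < 8:
--         issues.append("at least 8 characters")
--     if not has_digit:
--         issues.append("contain at least one digit")
--     if not has_upper:
--         issues.append("contain at least one uppercase letter")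
--     if not has_lower:
--         issues.append("contain at least one lowercase letter")
--     if not has_special:
--         issues.append("contain at least one special character")
--     return ", ".join(issues) if issues else "great password"
-- ===== Notes on version B (the rewrite author's own statement) =====
-- stated objective: alternative
-- what changed: B replaces A's four separate any(...) generator scans over the password with a single character loop maintaining four boolean flags, then builds the same issue list from the flags.
import Mathlib
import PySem

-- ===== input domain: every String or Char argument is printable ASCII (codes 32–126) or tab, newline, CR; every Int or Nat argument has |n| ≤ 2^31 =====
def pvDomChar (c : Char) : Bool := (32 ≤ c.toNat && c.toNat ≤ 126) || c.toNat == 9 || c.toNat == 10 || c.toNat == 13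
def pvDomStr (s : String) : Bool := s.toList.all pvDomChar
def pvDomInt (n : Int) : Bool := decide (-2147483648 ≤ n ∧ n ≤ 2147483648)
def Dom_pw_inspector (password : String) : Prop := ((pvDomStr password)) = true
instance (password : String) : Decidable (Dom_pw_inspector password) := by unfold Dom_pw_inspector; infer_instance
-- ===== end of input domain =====

-- B replaces A's four separate any(...) scans with one character loop maintaining four boolean flags (alternative decomposition, same cost).


-- the special-character set, byte for byte
def pwSpecials : List Char := "!@#$%^&*()-_=+[]{}|;:',.<>?/".toList

-- ===== PORT A =====
-- A: an issue list built by six independent checks, four of them any(...) scans over the password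
def pw_inspector (password : String) : String :=
  let cs := password.toList
  let i0 : List String := []
  let i1 := if cs.isEmpty then i0 ++ ["Please enter a password"] else i0
  let i2 := if cs.length < 8 then i1 ++ ["at least 8 characters"] else i1
  let i3 := if !(cs.any PySem.Chars.isdigit) then i2 ++ ["contain at least one digit"] else i2
  let i4 := if !(cs.any PySem.Chars.isupper) then i3 ++ ["contain at least one uppercase letter"] else i3
  let i5 := if !(cs.any PySem.Chars.islower) then i4 ++ ["contain at least one lowercase letter"] else i4
  -- 'char in "!@#$%^&*()-_=+[]{}|;:',.<>?/"' : substring test of the one-char string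
  let i6 := if !(cs.any (fun c => PySem.Chars.isIn [c] pwSpecials)) then i5 ++ ["contain at least one special character"] else i5
  if !i6.isEmpty then PySem.Str.join ", " i6 else "great password"

-- ===== PORT B =====
-- B: one fold over the characters computing the four flags, then the same list from the flags
def pwFlags (cs : List Char) : Bool × Bool × Bool × Bool :=
  cs.foldl
    (fun f c =>
      (f.1 || PySem.Chars.isdigit c,
       f.2.1 || PySem.Chars.isupper c,
       f.2.2.1 || PySem.Chars.islower c,
       f.2.2.2 || pwSpecials.contains c))
    (false, false, false, false)

def pw_inspector_alt (password : String) : String :=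
  let cs := password.toList
  let f := pwFlags cs
  let issues : List String :=
    (if cs.isEmpty then ["Please enter a password"] else []) ++
    (if cs.length < 8 then ["at least 8 characters"] else []) ++
    (if !f.1 then ["contain at least one digit"] else []) ++
    (if !f.2.1 then ["contain at least one uppercase letter"] else []) ++
    (if !f.2.2.1 then ["contain at least one lowercase letter"] else []) ++
    (if !f.2.2.2 then ["contain at least one special character"] else [])
  if !issues.isEmpty then PySem.Str.join ", " issues else "great password"

-- ===== PRECONDITION & SPEC =====
def Spec_pw_inspector (password : String) (out : String) : Prop := out = pw_inspector_alt password
instance (password : String) (out : String) : Decidable (Spec_pw_inspector password out) := by unfold Spec_pw_inspector; infer_instance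

-- ===== CLAIM (what is proved, stated in full; the proofs are below) =====
def Claim_equal_pw_inspector : Prop := ∀ (password : String), Dom_pw_inspector password → Spec_pw_inspector password (pw_inspector password)

-- ===== LEMMAS AND PROOFS =====

-- 'c in s' for a single character is list membership
theorem isIn_singleton (c : Char) (s : List Char) :
    PySem.Chars.isIn [c] s = s.contains c := by
  by_cases h : c ∈ s
  · rw [(PySem.Chars.isIn_iff_infix _ _).mpr]
    · simp [h]
    · obtain ⟨l1, l2, rfl⟩ := List.append_of_mem h
      exact ⟨l1, l2, by simp⟩
  · rw [(PySem.Chars.isIn_eq_false_iff _ _).mpr]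
    · simp [h]
    · intro hinf
      exact h (hinf.subset (by simp))

-- the single-pass fold computes exactly the four any-scans
theorem pwFlags_eq (cs : List Char) :
    pwFlags cs =
      (cs.any PySem.Chars.isdigit, cs.any PySem.Chars.isupper,
       cs.any PySem.Chars.islower, cs.any (fun c => pwSpecials.contains c)) := by
  have h : ∀ (cs : List Char) (a b c' d : Bool),
      cs.foldl
        (fun f c =>
          (f.1 || PySem.Chars.isdigit c,
           f.2.1 || PySem.Chars.isupper c,
           f.2.2.1 || PySem.Chars.islower c,
           f.2.2.2 || pwSpecials.contains c))
        (a, b, c', d) =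
      (a || cs.any PySem.Chars.isdigit, b || cs.any PySem.Chars.isupper,
       c' || cs.any PySem.Chars.islower, d || cs.any (fun c => pwSpecials.contains c)) := by
    intro cs
    induction cs with
    | nil => simp [List.foldl]
    | cons x xs ih =>
        intro a b c' d
        simp only [List.foldl_cons, List.any_cons, ih, Bool.or_assoc]
  unfold pwFlags
  rw [h cs false false false false]
  simp

-- ===== VERDICT (by name: the statement is the Claim_ definition above) =====
theorem pw_inspector_spec : Claim_equal_pw_inspector := by
  intro password _
  show pw_inspector password = pw_inspector_alt password
  unfold pw_inspector pw_inspector_alt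
  simp only [pwFlags_eq, isIn_singleton]
  rcases h1 : (password.toList).isEmpty <;>
  rcases h2 : decide (password.toList.length < 8) <;>
  rcases h3 : password.toList.any PySem.Chars.isdigit <;>
  rcases h4 : password.toList.any PySem.Chars.isupper <;>
  rcases h5 : password.toList.any PySem.Chars.islower <;>
  rcases h6 : password.toList.any (fun c => pwSpecials.contains c) <;>
  simp_all
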